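-- pv_equiv track=rewrite | github.com/BruinTracks/bruintracksv1 | new_scripts/scheduler/get_courses.py | create_term_sequence_2
-- ===== SOURCE A (Python) =====
-- def create_term_sequence_2(start_quarter: str, start_year: int, grad_quarter: str, grad_year: int):
--     """
--     Build a dictionary of term labels from start_quarter/start_year to grad_quarter/grad_year (inclusive).
--     Keys are term labels like 'Fall 2023', values are empty lists.
--     """
--     scheduler = {}
--     seasons = ["Fall", "Winter", "Spring"]
--
--     qtr = seasons.index(start_quarter)
--     grad_qtr = seasons.index(grad_quarter)
--     yr = start_year
--
--     while True:
--         term_label = f"{seasons[qtr]} {yr}"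
--         scheduler[term_label] = []
--
--         if qtr == grad_qtr and yr == grad_year:
--             break  # Reached graduation term
--
--         if qtr == 0:  # Rolled from Spring to Fall
--             yr += 1
--
--         qtr = (qtr + 1) % 3
--
--     return scheduler
-- ===== SOURCE B (Python) =====
-- def create_term_sequence_2(start_quarter: str, start_year: int, grad_quarter: str, grad_year: int):
--     seasons = ["Fall", "Winter", "Spring"]
--
--     def ordinal(q, y):
--         i = seasons.index(q)
--         return 3 * y if i == 0 else 3 * (y - 1) + i
--
--     def label(t):
--         y, r = t // 3, t % 3
--         return f"{seasons[r]} {y if r == 0 else y + 1}"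
--
--     start = ordinal(start_quarter, start_year)
--     end = ordinal(grad_quarter, grad_year)
--     return {label(t): [] for t in range(start, end + 1)}
-- ===== Notes on version B (the rewrite author's own statement) =====
-- stated objective: alternative
-- what changed: Replaces the stateful while-True loop over (quarter,year) pairs by encoding each term as a single integer ordinal (Fall y = 3y, Winter y = 3(y-1)+1, Spring y = 3(y-1)+2), computing start and end ordinals up front and building the dict with a comprehension over range(start, end+1), decoding each ordinal back to its label; B also returns {} instead of looping forever when the start term is after graduation (excluded by Pre_).
import Mathlib
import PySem

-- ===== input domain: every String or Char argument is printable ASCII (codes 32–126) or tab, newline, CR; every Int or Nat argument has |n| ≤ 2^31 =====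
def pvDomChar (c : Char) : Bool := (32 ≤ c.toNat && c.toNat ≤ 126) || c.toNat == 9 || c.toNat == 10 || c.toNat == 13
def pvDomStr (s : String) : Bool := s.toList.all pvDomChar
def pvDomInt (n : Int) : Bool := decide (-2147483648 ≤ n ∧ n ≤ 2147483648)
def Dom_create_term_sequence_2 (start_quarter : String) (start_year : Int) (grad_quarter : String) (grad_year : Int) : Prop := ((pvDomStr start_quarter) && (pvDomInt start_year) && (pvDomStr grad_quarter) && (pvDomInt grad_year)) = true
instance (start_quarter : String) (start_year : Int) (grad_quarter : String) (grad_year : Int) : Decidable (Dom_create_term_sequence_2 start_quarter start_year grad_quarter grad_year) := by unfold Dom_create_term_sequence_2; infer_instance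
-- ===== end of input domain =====

-- B replaces A's stateful while-True loop over (quarter, year) by an integer term-ordinal
-- encoding and a dict comprehension over range(start, end+1): an alternative decomposition.


-- ===== PORT A =====
def ctsSeasons : List String := ["Fall", "Winter", "Spring"]

-- term ordinal of loop state (qtr, yr); used only as the exact fuel bound for A's while-loop
def ctsOrd (qtr yr : Int) : Int := if qtr == 0 then 3 * yr else 3 * yr + qtr - 3

-- the body of A's 'while True' loop, fuelled (the fuel is the exact iteration count when A terminates)
def ctsLoopA (grad_qtr grad_year : Int) : Nat → Int → Int → PySem.Dict String (List Int) → PySem.Dict String (List Int)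
  | 0, _, _, sched => sched
  | n + 1, qtr, yr, sched =>
    let term_label := PySem.List.pyGetD ctsSeasons qtr "" ++ " " ++ PySem.Int.toStr yr
    let sched2 := sched.insert term_label []
    if qtr == grad_qtr && yr == grad_year then sched2
    else ctsLoopA grad_qtr grad_year n (PySem.Int.mod (qtr + 1) 3) (if qtr == 0 then yr + 1 else yr) sched2

def create_term_sequence_2 (start_quarter : String) (start_year : Int) (grad_quarter : String) (grad_year : Int) : List (String × List Int) :=
  match PySem.List.index? ctsSeasons start_quarter, PySem.List.index? ctsSeasons grad_quarter with
  | some qtr, some grad_qtr =>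
      (ctsLoopA (grad_qtr : Int) grad_year
        ((ctsOrd (grad_qtr : Int) grad_year - ctsOrd (qtr : Int) start_year + 1).toNat)
        (qtr : Int) start_year PySem.Dict.empty).items
  | _, _ => []  -- seasons.index raises ValueError: outside Pre_

-- ===== PORT B =====
def ctsOrdinal (i : Nat) (y : Int) : Int := if i == 0 then 3 * y else 3 * (y - 1) + (i : Int)

def ctsLabel (t : Int) : String :=
  let y := PySem.Int.floordiv t 3
  let r := PySem.Int.mod t 3
  PySem.List.pyGetD ctsSeasons r "" ++ " " ++ PySem.Int.toStr (if r == 0 then y else y + 1)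

def create_term_sequence_2_alt (start_quarter : String) (start_year : Int) (grad_quarter : String) (grad_year : Int) : List (String × List Int) :=
  match PySem.List.index? ctsSeasons start_quarter with
  | none => []  -- ValueError: outside Pre_
  | some i =>
    match PySem.List.index? ctsSeasons grad_quarter with
    | none => []  -- ValueError: outside Pre_
    | some j =>
      ((PySem.List.pyRange (ctsOrdinal i start_year) (ctsOrdinal j grad_year + 1) 1).foldl
        (fun d t => d.insert (ctsLabel t) ([] : List Int)) PySem.Dict.empty).items

-- ===== PRECONDITION & SPEC =====
-- Pre_ excludes season names not in ["Fall","Winter","Spring"] (seasons.index raises ValueError)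
-- and start terms strictly after the graduation term (A's while-True loop never terminates there).
def ctsOrdOf (q : String) (y : Int) : Int :=
  if q = "Fall" then 3 * y else if q = "Winter" then 3 * y - 2 else 3 * y - 1

def Pre_create_term_sequence_2 (start_quarter : String) (start_year : Int) (grad_quarter : String) (grad_year : Int) : Prop :=
  start_quarter ∈ ctsSeasons ∧ grad_quarter ∈ ctsSeasons ∧
    ctsOrdOf start_quarter start_year ≤ ctsOrdOf grad_quarter grad_year
instance (start_quarter : String) (start_year : Int) (grad_quarter : String) (grad_year : Int) : Decidable (Pre_create_term_sequence_2 start_quarter start_year grad_quarter grad_year) := by unfold Pre_create_term_sequence_2; infer_instance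

def pvWitness_create_term_sequence_2 : String × Int × String × Int := ("Fall", 2023, "Spring", 2024)

def Spec_create_term_sequence_2 (start_quarter : String) (start_year : Int) (grad_quarter : String) (grad_year : Int) (out : List (String × List Int)) : Prop := out = create_term_sequence_2_alt start_quarter start_year grad_quarter grad_year
instance (start_quarter : String) (start_year : Int) (grad_quarter : String) (grad_year : Int) (out : List (String × List Int)) : Decidable (Spec_create_term_sequence_2 start_quarter start_year grad_quarter grad_year out) := by unfold Spec_create_term_sequence_2; infer_instance

-- ===== CLAIM (what is proved, stated in full; the proofs are below) =====
def Claim_equal_create_term_sequence_2 : Prop := ∀ (start_quarter : String) (start_year : Int) (grad_quarter : String) (grad_year : Int), Dom_create_term_sequence_2 start_quarter start_year grad_quarter grad_year → Pre_create_term_sequence_2 start_quarter start_year grad_quarter grad_year → Spec_create_term_sequence_2 start_quarter start_year grad_quarter grad_year (create_term_sequence_2 start_quarter start_year grad_quarter grad_year)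

-- ===== LEMMAS AND PROOFS =====

lemma cts_ord_inj (q y q' y' : Int) (h0 : 0 ≤ q) (h3 : q < 3) (h0' : 0 ≤ q') (h3' : q' < 3) :
    ctsOrd q y = ctsOrd q' y' ↔ q = q' ∧ y = y' := by
  simp only [ctsOrd, beq_iff_eq]
  split_ifs <;> omega

-- the label B decodes from the term ordinal is exactly the label A builds from the loop state
lemma cts_label_ord (qtr yr : Int) (h0 : 0 ≤ qtr) (h3 : qtr < 3) :
    ctsLabel (ctsOrd qtr yr) =
      PySem.List.pyGetD ctsSeasons qtr "" ++ " " ++ PySem.Int.toStr yr := by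
  have hq : qtr = 0 ∨ qtr = 1 ∨ qtr = 2 := by omega
  rcases hq with h | h | h <;> subst h
  · have hm : PySem.Int.mod (ctsOrd 0 yr) 3 = 0 := by
      simp [ctsOrd, PySem.Int.mod, Int.fmod_eq_emod]; try omega
    have hd : PySem.Int.floordiv (ctsOrd 0 yr) 3 = yr := by
      simp [ctsOrd, PySem.Int.floordiv, Int.fdiv_eq_ediv]; try omega
    simp only [ctsLabel]
    rw [hm, hd]
    norm_num
  · have hm : PySem.Int.mod (ctsOrd 1 yr) 3 = 1 := by
      simp [ctsOrd, PySem.Int.mod, Int.fmod_eq_emod]; try omega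
    have hd : PySem.Int.floordiv (ctsOrd 1 yr) 3 = yr - 1 := by
      simp [ctsOrd, PySem.Int.floordiv, Int.fdiv_eq_ediv]; try omega
    simp only [ctsLabel]
    rw [hm, hd]
    norm_num
  · have hm : PySem.Int.mod (ctsOrd 2 yr) 3 = 2 := by
      simp [ctsOrd, PySem.Int.mod, Int.fmod_eq_emod]; try omega
    have hd : PySem.Int.floordiv (ctsOrd 2 yr) 3 = yr - 1 := by
      simp [ctsOrd, PySem.Int.floordiv, Int.fdiv_eq_ediv]; try omega
    simp only [ctsLabel]
    rw [hm, hd]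
    norm_num

-- A's fuelled while-loop performs exactly B's fold of inserts over the ordinal range
lemma cts_loopA_eq (gq gy : Int) (hg0 : 0 ≤ gq) (hg3 : gq < 3) :
    ∀ (m : Nat) (qtr yr : Int) (d : PySem.Dict String (List Int)),
      0 ≤ qtr → qtr < 3 → ctsOrd qtr yr ≤ ctsOrd gq gy →
      m = (ctsOrd gq gy - ctsOrd qtr yr).toNat →
      ctsLoopA gq gy (m + 1) qtr yr d =
        (PySem.List.pyRange (ctsOrd qtr yr) (ctsOrd gq gy + 1) 1).foldl
          (fun d t => d.insert (ctsLabel t) ([] : List Int)) d := by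
  intro m
  induction m with
  | zero =>
    intro qtr yr d h0 h3 hle hm
    have heq : ctsOrd qtr yr = ctsOrd gq gy := by omega
    obtain ⟨hq, hy⟩ := (cts_ord_inj qtr yr gq gy h0 h3 hg0 hg3).mp heq
    subst hq; subst hy
    rw [heq, PySem.List.pyRange_one_singleton]
    simp [ctsLoopA, cts_label_ord qtr yr h0 h3]
  | succ m ih =>
    intro qtr yr d h0 h3 hle hm
    have hlt : ctsOrd qtr yr < ctsOrd gq gy := by omega
    have hne : ¬(qtr = gq ∧ yr = gy) := by
      rintro ⟨rfl, rfl⟩; omega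
    have hcond : (qtr == gq && yr == gy) = false := by
      cases hb : (qtr == gq && yr == gy)
      · rfl
      · exfalso; apply hne
        simpa [beq_iff_eq] using hb
    -- the successor state and its ordinal
    have hq' : qtr = 0 ∨ qtr = 1 ∨ qtr = 2 := by omega
    have hstep : 0 ≤ PySem.Int.mod (qtr + 1) 3 ∧ PySem.Int.mod (qtr + 1) 3 < 3 ∧
        ctsOrd (PySem.Int.mod (qtr + 1) 3) (if (qtr == (0:Int)) = true then yr + 1 else yr)
          = ctsOrd qtr yr + 1 := by
      rcases hq' with h | h | h <;> subst h <;>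
        simp [ctsOrd] <;> ring
    show ctsLoopA gq gy (m + 1 + 1) qtr yr d = _
    simp only [ctsLoopA, hcond, Bool.false_eq_true, if_false]
    rw [PySem.List.pyRange_one_cons (by omega : ctsOrd qtr yr < ctsOrd gq gy + 1)]
    simp only [List.foldl_cons]
    rw [cts_label_ord qtr yr h0 h3] at *
    rw [← hstep.2.2]
    exact ih (PySem.Int.mod (qtr + 1) 3) (if (qtr == (0:Int)) = true then yr + 1 else yr) _
      hstep.1 hstep.2.1 (by rw [hstep.2.2]; omega) (by rw [hstep.2.2]; omega)

-- the two ordinal encodings agree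
lemma cts_ordinal_eq (i : Nat) (y : Int) : ctsOrdinal i y = ctsOrd (i : Int) y := by
  by_cases h : i = 0
  · subst h; simp [ctsOrdinal, ctsOrd]
  · have : ((i : Int) == 0) = false := by simp [h]
    simp [ctsOrdinal, ctsOrd, h, this]; ring

lemma cts_top (i j : Nat) (sy gy : Int) (hi : i < 3) (hj : j < 3)
    (hle : ctsOrd (i : Int) sy ≤ ctsOrd (j : Int) gy) :
    (ctsLoopA (j : Int) gy ((ctsOrd (j : Int) gy - ctsOrd (i : Int) sy + 1).toNat)
        (i : Int) sy PySem.Dict.empty).items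
      = ((PySem.List.pyRange (ctsOrdinal i sy) (ctsOrdinal j gy + 1) 1).foldl
          (fun d t => d.insert (ctsLabel t) ([] : List Int)) PySem.Dict.empty).items := by
  have hfuel : (ctsOrd (j : Int) gy - ctsOrd (i : Int) sy + 1).toNat
      = (ctsOrd (j : Int) gy - ctsOrd (i : Int) sy).toNat + 1 := by omega
  rw [hfuel, cts_ordinal_eq, cts_ordinal_eq,
    cts_loopA_eq (j : Int) gy (by positivity) (by exact_mod_cast hj) _ (i : Int) sy
      PySem.Dict.empty (by positivity) (by exact_mod_cast hi) hle rfl]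

-- ===== VERDICT (by name: the statement is the Claim_ definition above) =====
theorem create_term_sequence_2_spec : Claim_equal_create_term_sequence_2 := by
  intro sq sy gq gy _hdom hpre
  unfold Spec_create_term_sequence_2
  obtain ⟨hs, hg, hle⟩ := hpre
  simp only [ctsSeasons, List.mem_cons, List.not_mem_nil, or_false] at hs hg
  have e0 : PySem.List.index? ctsSeasons "Fall" = some 0 := by decide
  have e1 : PySem.List.index? ctsSeasons "Winter" = some 1 := by decide
  have e2 : PySem.List.index? ctsSeasons "Spring" = some 2 := by decide
  rcases hs with rfl | rfl | rfl <;> rcases hg with rfl | rfl | rfl <;>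
    simp only [create_term_sequence_2, create_term_sequence_2_alt, e0, e1, e2] <;>
    apply cts_top <;> first
      | omega
      | (simp only [ctsOrdOf] at hle; norm_num at hle ⊢; simp [ctsOrd] at hle ⊢ <;> omega)
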